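-- pv_equiv track=rewrite | github.com/AlbertoIchikawa/my-first-blog | HeadFirstPython/string_splosion problem/max_span.py | max_span
-- ===== SOURCE A (Python) =====
-- def max_span(data_list):
--     result = []
--     numlist = []
--     spanlist = []
--     # 配列の中の番号種類の取得
--     for i, e in enumerate(data_list):
--         if e not in numlist:
--             numlist.append(e)
--
--     # 次にそれぞれの番号のインデックス値を取得してresultに入れる。
--     # それぞれの数字のインデックス値を使ってspanの計算（最後のインデックス値から最初のインデックス値を引いて＋１するとspanがわかる。）
--     for num in numlist:
--         result = [i for i, e in enumerate(data_list) if e == num]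
--         spanlist.append(result[-1] - result[0] + 1)
--
--     # spanlistに値がないとき、０を入れる。
--     if not spanlist:
--         spanlist.append(0)
--
--     return max(spanlist)
-- ===== SOURCE B (Python) =====
-- def max_span(data_list):
--     first = {}
--     best = 0
--     for i, e in enumerate(data_list):
--         if e not in first:
--             first[e] = i
--         span = i - first[e] + 1
--         if span > best:
--             best = span
--     return best
-- ===== Notes on version B (the rewrite author's own statement) =====
-- stated objective: faster
-- what changed: Replaced the distinct-value scan plus per-value full rescan (quadratic) by a single pass that records each value's first index in a dict and tracks the running maximum of i - first[e] + 1.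
import Mathlib
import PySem

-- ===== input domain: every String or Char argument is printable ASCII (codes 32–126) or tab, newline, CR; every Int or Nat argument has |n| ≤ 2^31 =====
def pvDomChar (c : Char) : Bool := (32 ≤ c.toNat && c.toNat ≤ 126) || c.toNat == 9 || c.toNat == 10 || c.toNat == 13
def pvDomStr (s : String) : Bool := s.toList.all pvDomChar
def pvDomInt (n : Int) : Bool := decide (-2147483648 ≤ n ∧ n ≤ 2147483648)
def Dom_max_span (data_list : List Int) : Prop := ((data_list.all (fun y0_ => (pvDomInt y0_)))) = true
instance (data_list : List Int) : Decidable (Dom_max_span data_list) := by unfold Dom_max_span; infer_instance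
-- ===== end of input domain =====

-- B replaces A's per-distinct-value full rescans by a single pass with a first-occurrence dict (objective: faster).

-- ===== PORT A =====
-- result[-1] / result[0] are ported as pyGet?‥.getD 0; the list is nonempty whenever A reads it
-- (num comes from numlist, so it occurs in data_list), so the default is never used and the port is exact.
def max_span (data_list : List Int) : Int :=
  let numlist : List Int :=
    (PySem.List.enumerate data_list).foldl
      (fun nl ie => if ie.2 ∈ nl then nl else nl ++ [ie.2]) []
  let spanlist : List Int :=
    numlist.foldl
      (fun sl num =>
        let result : List Int :=
          ((PySem.List.enumerate data_list).filter (fun p => p.2 == num)).map (fun p => p.1)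
        sl ++ [(PySem.List.pyGet? result (-1)).getD 0 - (PySem.List.pyGet? result 0).getD 0 + 1]) []
  let spanlist2 : List Int := if spanlist = [] then spanlist ++ [0] else spanlist
  (PySem.List.max? spanlist2 (fun x => x)).getD 0

-- ===== PORT B =====
def max_span_alt (data_list : List Int) : Int :=
  ((PySem.List.enumerate data_list).foldl
      (fun st ie =>
        let first := if st.1.contains ie.2 then st.1 else st.1.insert ie.2 ie.1
        let span := ie.1 - first.getD ie.2 0 + 1
        (first, if span > st.2 then span else st.2))
      ((PySem.Dict.empty : PySem.Dict Int Int), (0 : Int))).2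

-- ===== PRECONDITION & SPEC =====
def Spec_max_span (data_list : List Int) (out : Int) : Prop := out = max_span_alt data_list
instance (data_list : List Int) (out : Int) : Decidable (Spec_max_span data_list out) := by unfold Spec_max_span; infer_instance

-- ===== CLAIM (what is proved, stated in full; the proofs are below) =====
def Claim_equal_max_span : Prop := ∀ (data_list : List Int), Dom_max_span data_list → Spec_max_span data_list (max_span data_list)

-- ===== LEMMAS AND PROOFS =====

-- the index list A builds for a value v (enumerate-filter-map), with a general start index
def occA (s : Int) (l : List Int) (v : Int) : List Int :=
  ((PySem.List.enumerate l s).filter (fun p => p.2 == v)).map (fun p => p.1)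

-- A's per-value span expression
def spanOf (l : List Int) (v : Int) : Int :=
  (PySem.List.pyGet? (occA 0 l v) (-1)).getD 0 - (PySem.List.pyGet? (occA 0 l v) 0).getD 0 + 1

-- max of a list, Python-style (0 default never used on the lists we apply it to)
def M (xs : List Int) : Int := (PySem.List.max? xs (fun x => x)).getD 0

-- B's fold, with the state exposed
def Bfold (l : List Int) : PySem.Dict Int Int × Int :=
  (PySem.List.enumerate l).foldl
    (fun st ie =>
      let first := if st.1.contains ie.2 then st.1 else st.1.insert ie.2 ie.1
      let span := ie.1 - first.getD ie.2 0 + 1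
      (first, if span > st.2 then span else st.2))
    ((PySem.Dict.empty : PySem.Dict Int Int), (0 : Int))

lemma alt_eq (l : List Int) : max_span_alt l = (Bfold l).2 := rfl

lemma foldl_enum_snd {β : Type} (l : List Int) (s : Int) (g : β → Int → β) (init : β) :
    (PySem.List.enumerate l s).foldl (fun acc p => g acc p.2) init = l.foldl g init := by
  induction l generalizing s init with
  | nil => simp [PySem.List.enumerate]
  | cons a t ih => simp [PySem.List.enumerate_cons, ih]

lemma numlist_eq (l : List Int) :
    (PySem.List.enumerate l).foldl
      (fun nl ie => if ie.2 ∈ nl then nl else nl ++ [ie.2]) [] = PySem.Set.ofList l := by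
  rw [foldl_enum_snd l 0 (fun nl e => if e ∈ nl then nl else nl ++ [e]) []]
  rw [PySem.Set.ofList_eq_foldl]
  refine PySem.List.foldl_congr_mem l _ _ [] ?_
  intro acc x _
  by_cases hx : x ∈ acc <;> simp [PySem.Set.add, hx]

lemma pyGet_neg_one (xs : List Int) (h : xs ≠ []) :
    PySem.List.pyGet? xs (-1) = xs.getLast? := by
  have hn : 0 < xs.length := List.length_pos_iff.mpr h
  simp only [PySem.List.pyGet?, PySem.List.pyIdx?]
  rw [if_neg (by omega), if_pos (by omega : -(xs.length : Int) ≤ -1)]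
  rw [List.getLast?_eq_getElem?]
  norm_num

lemma pyGet_zero (xs : List Int) (h : xs ≠ []) :
    PySem.List.pyGet? xs 0 = xs.head? := by
  have hn : 0 < xs.length := List.length_pos_iff.mpr h
  simp only [PySem.List.pyGet?, PySem.List.pyIdx?]
  rw [if_pos le_rfl, if_pos (by exact_mod_cast hn)]
  simp [List.head?_eq_getElem?]

lemma occ_snoc (s : Int) (l : List Int) (x v : Int) :
    occA s (l ++ [x]) v = occA s l v ++ (if x = v then [s + l.length] else []) := by
  simp only [occA, PySem.List.enumerate_append, List.filter_append, List.map_append]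
  congr 1
  simp [PySem.List.enumerate, List.filter_cons]
  split_ifs with h <;> simp_all

lemma occ_head (s : Int) (l : List Int) (v : Int) (h : v ∈ l) :
    (occA s l v).head? = some (s + (List.idxOf v l : Int)) := by
  induction l generalizing s with
  | nil => simp at h
  | cons a t ih =>
    by_cases hav : a = v
    · subst hav
      simp [occA, PySem.List.enumerate_cons, List.idxOf_cons_self]
    · have hv : v ∈ t := by
        rcases List.mem_cons.mp h with h' | h'
        · exact absurd h'.symm hav
        · exact h'
      have : occA s (a :: t) v = occA (s + 1) t v := by
        simp [occA, PySem.List.enumerate_cons, hav]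
      rw [this, ih (s + 1) hv, List.idxOf_cons_ne t hav]
      push_cast
      ring_nf

lemma occ_bounds (s : Int) (l : List Int) (v : Int) :
    ∀ i ∈ occA s l v, s ≤ i ∧ i < s + l.length := by
  intro i hi
  simp only [occA, List.mem_map, List.mem_filter] at hi
  obtain ⟨p, ⟨hp, _⟩, rfl⟩ := hi
  rw [PySem.List.mem_enumerate_iff] at hp
  obtain ⟨k, hk, rfl⟩ := hp
  constructor <;> [omega; (push_cast; omega)]

lemma occ_nil (s : Int) (l : List Int) (v : Int) (h : v ∉ l) : occA s l v = [] := by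
  simp only [occA, List.map_eq_nil_iff, List.filter_eq_nil_iff]
  intro p hp
  rw [PySem.List.mem_enumerate_iff] at hp
  obtain ⟨k, hk, rfl⟩ := hp
  simp only [beq_iff_eq]
  intro hc
  exact h (hc ▸ List.getElem_mem hk)

lemma occ_ne_nil (s : Int) (l : List Int) (v : Int) (h : v ∈ l) : occA s l v ≠ [] := by
  intro hc
  have := occ_head s l v h
  rw [hc] at this
  simp at this

lemma spanOf_eq (l : List Int) (v : Int) (h : v ∈ l) :
    ∃ g, (occA 0 l v).getLast? = some g ∧ 0 ≤ g ∧ g < l.length ∧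
      spanOf l v = g - (List.idxOf v l : Int) + 1 := by
  have hne := occ_ne_nil 0 l v h
  obtain ⟨g, hg⟩ : ∃ g, (occA 0 l v).getLast? = some g := by
    cases hgl : (occA 0 l v).getLast? with
    | none => exact absurd (List.getLast?_eq_none_iff.mp hgl) hne
    | some g => exact ⟨g, rfl⟩
  have hmem : g ∈ occA 0 l v := List.mem_of_getLast? hg
  have hb := occ_bounds 0 l v g hmem
  refine ⟨g, hg, by omega, by omega, ?_⟩
  rw [spanOf, pyGet_neg_one _ hne, pyGet_zero _ hne, hg, occ_head 0 l v h]
  simp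

lemma spanOf_snoc_ne (l : List Int) (x v : Int) (hvx : v ≠ x) :
    spanOf (l ++ [x]) v = spanOf l v := by
  rw [spanOf, spanOf, occ_snoc, if_neg (fun h => hvx h.symm), List.append_nil]

lemma spanOf_snoc_self (l : List Int) (x : Int) :
    spanOf (l ++ [x]) x = (l.length : Int) - (List.idxOf x (l ++ [x]) : Int) + 1 := by
  have hocc : occA 0 (l ++ [x]) x = occA 0 l x ++ [(l.length : Int)] := by
    rw [occ_snoc, if_pos rfl]; norm_num
  have hne : occA 0 (l ++ [x]) x ≠ [] := by rw [hocc]; simp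
  rw [spanOf, pyGet_neg_one _ hne, pyGet_zero _ hne, hocc]
  rw [List.getLast?_concat]
  by_cases hx : x ∈ l
  · rw [List.idxOf_append_of_mem hx]
    have hh := occ_head 0 l x hx
    cases hoc : occA 0 l x with
    | nil => exact absurd hoc (occ_ne_nil 0 l x hx)
    | cons a t =>
      rw [hoc] at hh
      simp only [List.head?_cons, Option.some.injEq] at hh
      simp [hh]
  · rw [occ_nil 0 l x hx, List.idxOf_append_of_notMem hx]
    simp [List.idxOf_cons_self]

lemma M_mem (xs : List Int) (h : xs ≠ []) : M xs ∈ xs := by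
  cases hm : PySem.List.max? xs (fun x => x) with
  | none => exact absurd ((PySem.List.max?_eq_none_iff xs _).mp hm) h
  | some m =>
    have := PySem.List.max?_mem hm
    simpa [M, hm] using this

lemma M_le (xs : List Int) (y : Int) (h : y ∈ xs) : y ≤ M xs := by
  have hne : xs ≠ [] := List.ne_nil_of_mem h
  cases hm : PySem.List.max? xs (fun x => x) with
  | none => exact absurd ((PySem.List.max?_eq_none_iff xs _).mp hm) hne
  | some m =>
    have := PySem.List.max?_isMax hm y h
    simpa [M, hm] using this

lemma A_eq (l : List Int) :
    max_span l = if l = [] then 0 else M ((PySem.Set.ofList l).map (spanOf l)) := by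
  have h1 : max_span l =
      (PySem.List.max? (if (PySem.Set.ofList l).map (spanOf l) = []
          then (PySem.Set.ofList l).map (spanOf l) ++ [0]
          else (PySem.Set.ofList l).map (spanOf l)) (fun x => x)).getD 0 := by
    simp only [max_span]
    rw [numlist_eq, PySem.List.foldl_append_singleton_eq_map]
    simp only [List.nil_append]
    rfl
  by_cases hl : l = []
  · subst hl
    rw [h1]
    decide
  · have hset : (PySem.Set.ofList l).map (spanOf l) ≠ [] := by
      obtain ⟨a, ha⟩ := List.exists_mem_of_ne_nil l hl
      simp only [ne_eq, List.map_eq_nil_iff]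
      exact List.ne_nil_of_mem ((PySem.Set.mem_ofList l a).mpr ha)
    rw [h1, if_neg hset, if_neg hl, M]

lemma Bfold_snoc (l : List Int) (x : Int) :
    Bfold (l ++ [x]) =
      (let st := Bfold l
       let first := if st.1.contains x then st.1 else st.1.insert x (l.length : Int)
       let span := (l.length : Int) - first.getD x 0 + 1
       (first, if span > st.2 then span else st.2)) := by
  unfold Bfold
  rw [PySem.List.enumerate_append, List.foldl_append]
  simp [PySem.List.enumerate]

lemma dict_inv (l : List Int) :
    ∀ v, (Bfold l).1.get? v = if v ∈ l then some ((List.idxOf v l : Nat) : Int) else none := by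
  induction l using List.reverseRecOn with
  | nil => intro v; simp [Bfold, PySem.List.enumerate, PySem.Dict.get?_empty]
  | append_singleton t x ih =>
    intro v
    rw [Bfold_snoc]
    simp only
    by_cases hx : x ∈ t
    · have hc : (Bfold t).1.contains x = true := by
        rw [PySem.Dict.contains_eq_isSome_get?, ih x, if_pos hx]; rfl
      rw [if_pos hc, ih v]
      by_cases hv : v ∈ t
      · rw [if_pos hv, if_pos (List.mem_append_left _ hv), List.idxOf_append_of_mem hv]
      · rw [if_neg hv]
        by_cases hvx : v = x
        · subst hvx; exact absurd hx hv
        · rw [if_neg (by simp [hv, hvx])]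
    · have hc : (Bfold t).1.contains x = false := by
        rw [PySem.Dict.contains_eq_isSome_get?, ih x, if_neg hx]; rfl
      rw [if_neg (by simp [hc])]
      by_cases hvx : v = x
      · subst hvx
        rw [PySem.Dict.get?_insert_self, if_pos (by simp), List.idxOf_append_of_notMem hx]
        simp [List.idxOf_cons_self]
      · rw [PySem.Dict.get?_insert_of_ne _ _ hvx, ih v]
        by_cases hv : v ∈ t
        · rw [if_pos hv, if_pos (List.mem_append_left _ hv), List.idxOf_append_of_mem hv]
        · rw [if_neg hv, if_neg (by simp [hv, hvx])]

lemma B_snoc (l : List Int) (x : Int) :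
    max_span_alt (l ++ [x]) =
      max (max_span_alt l) ((l.length : Int) - (List.idxOf x (l ++ [x]) : Int) + 1) := by
  rw [alt_eq, alt_eq, Bfold_snoc]
  simp only
  have hfirst : (if (Bfold l).1.contains x then (Bfold l).1
      else (Bfold l).1.insert x (l.length : Int)).getD x 0 = (List.idxOf x (l ++ [x]) : Int) := by
    by_cases hx : x ∈ l
    · have hc : (Bfold l).1.contains x = true := by
        rw [PySem.Dict.contains_eq_isSome_get?, dict_inv l x, if_pos hx]; rfl
      rw [if_pos hc, PySem.Dict.getD_eq_get?_getD, dict_inv l x, if_pos hx,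
        List.idxOf_append_of_mem hx]
      rfl
    · have hc : (Bfold l).1.contains x = false := by
        rw [PySem.Dict.contains_eq_isSome_get?, dict_inv l x, if_neg hx]; rfl
      rw [if_neg (by simp [hc]), PySem.Dict.getD_eq_get?_getD, PySem.Dict.get?_insert_self,
        List.idxOf_append_of_notMem hx]
      simp [List.idxOf_cons_self]
  rw [hfirst]
  rcases max_cases ((Bfold l).2) ((l.length : Int) - (List.idxOf x (l ++ [x]) : Int) + 1) with
    ⟨h1, h2⟩ | ⟨h1, h2⟩ <;> rw [h1] <;> split_ifs <;> omega

lemma span_le_snoc (l : List Int) (x : Int) (hx : x ∈ l) :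
    spanOf l x ≤ (l.length : Int) - (List.idxOf x (l ++ [x]) : Int) + 1 := by
  obtain ⟨g, _, _, hglt, heq⟩ := spanOf_eq l x hx
  rw [heq, List.idxOf_append_of_mem hx]
  omega

lemma A_snoc (l : List Int) (x : Int) :
    max_span (l ++ [x]) =
      max (max_span l) ((l.length : Int) - (List.idxOf x (l ++ [x]) : Int) + 1) := by
  set c := (l.length : Int) - (List.idxOf x (l ++ [x]) : Int) + 1 with hc
  have hxmem : x ∈ l ++ [x] := List.mem_append_right _ (by simp)
  have hspanx : spanOf (l ++ [x]) x = c := spanOf_snoc_self l x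
  rw [A_eq, A_eq, if_neg (by simp)]
  by_cases hl : l = []
  · subst hl
    rw [if_pos rfl]
    simp only [List.nil_append] at hspanx hc ⊢
    have h1 : (PySem.Set.ofList [x]).map (spanOf [x]) = [spanOf [x] x] := by
      simp [PySem.Set.ofList, PySem.Set.add]
    have hM : M [spanOf [x] x] = spanOf [x] x := by
      simpa using M_mem [spanOf [x] x] (by simp)
    have hc1 : c = 1 := by simp [hc, List.idxOf_cons_self]
    rw [h1, hM, hspanx, hc1]
    decide
  · rw [if_neg hl]
    set L := M ((PySem.Set.ofList (l ++ [x])).map (spanOf (l ++ [x]))) with hL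
    set R := M ((PySem.Set.ofList l).map (spanOf l)) with hR
    have hsetne : PySem.Set.ofList l ≠ [] := by
      obtain ⟨a, ha⟩ := List.exists_mem_of_ne_nil l hl
      exact List.ne_nil_of_mem ((PySem.Set.mem_ofList l a).mpr ha)
    have hsetne' : (PySem.Set.ofList (l ++ [x])).map (spanOf (l ++ [x])) ≠ [] := by
      have hx' : x ∈ PySem.Set.ofList (l ++ [x]) := (PySem.Set.mem_ofList _ x).mpr hxmem
      simp only [ne_eq, List.map_eq_nil_iff]
      exact List.ne_nil_of_mem hx'
    -- L ≤ max R c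
    have hLle : L ≤ max R c := by
      have hLmem : L ∈ (PySem.Set.ofList (l ++ [x])).map (spanOf (l ++ [x])) :=
        M_mem _ hsetne'
      obtain ⟨v, hv, hveq⟩ := List.mem_map.mp hLmem
      have hv' : v ∈ l ++ [x] := (PySem.Set.mem_ofList _ v).mp hv
      by_cases hvx : v = x
      · subst hvx
        rw [← hveq, hspanx]
        exact le_max_right _ _
      · have hvl : v ∈ l := by
          rcases List.mem_append.mp hv' with h' | h'
          · exact h'
          · simp at h'; exact absurd h' hvx
        rw [← hveq, spanOf_snoc_ne l x v hvx]
        refine le_trans ?_ (le_max_left R c)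
        exact M_le _ _ (List.mem_map.mpr ⟨v, (PySem.Set.mem_ofList l v).mpr hvl, rfl⟩)
    -- max R c ≤ L
    have hcle : c ≤ L := by
      rw [← hspanx]
      exact M_le _ _ (List.mem_map.mpr ⟨x, (PySem.Set.mem_ofList _ x).mpr hxmem, rfl⟩)
    have hRle : R ≤ L := by
      have hRmem : R ∈ (PySem.Set.ofList l).map (spanOf l) :=
        M_mem _ (by simp [hsetne, List.map_eq_nil_iff])
      obtain ⟨v, hv, hveq⟩ := List.mem_map.mp hRmem
      have hvl : v ∈ l := (PySem.Set.mem_ofList l v).mp hv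
      by_cases hvx : v = x
      · subst hvx
        calc R = spanOf l v := hveq.symm
          _ ≤ c := span_le_snoc l v hvl
          _ ≤ L := hcle
      · have : spanOf (l ++ [x]) v = spanOf l v := spanOf_snoc_ne l x v hvx
        rw [← hveq, ← this]
        exact M_le _ _ (List.mem_map.mpr
          ⟨v, (PySem.Set.mem_ofList _ v).mpr (List.mem_append_left _ hvl), rfl⟩)
    omega

lemma AB_eq (l : List Int) : max_span l = max_span_alt l := by
  induction l using List.reverseRecOn with
  | nil => decide
  | append_singleton t x ih => rw [A_snoc, B_snoc, ih]

-- ===== VERDICT (by name: the statement is the Claim_ definition above) =====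
theorem max_span_spec : Claim_equal_max_span := by
  intro data_list _
  exact AB_eq data_list
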